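-- pv_equiv track=rewrite | github.com/hatemile/hatemile-for-python | hatemile/implementation/accessibletableimplementation.py | _validate_header
-- ===== SOURCE A (Python) =====
-- def _validate_header(header):
--     """
--     Validate the list that represents the table header.
--
--     :param header: The list that represents the table header.
--     :type header: list(list(hatemile.util.htmldomelement.HTMLDOMElement))
--     :return: True if the table header is valid or False if the table header
--              is not valid.
--     :rtype: bool
--     """
--
--     if not bool(header):
--         return False
--     length = -1
--     for row in header:
--         if not bool(row):
--             return False
--         elif length == -1:
--             length = len(row)
--         elif len(row) != length:
--             return False
--     return True
-- ===== SOURCE B (Python) =====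
-- def _validate_header(header):
--     if not header:
--         return False
--     lengths = {len(row) for row in header}
--     return len(lengths) == 1 and 0 not in lengths
-- ===== Notes on version B (the rewrite author's own statement) =====
-- stated objective: simpler
-- what changed: Replaces the -1-sentinel early-exit scan with a set comprehension of distinct row lengths checked declaratively (exactly one distinct length and it is nonzero).
import Mathlib
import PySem

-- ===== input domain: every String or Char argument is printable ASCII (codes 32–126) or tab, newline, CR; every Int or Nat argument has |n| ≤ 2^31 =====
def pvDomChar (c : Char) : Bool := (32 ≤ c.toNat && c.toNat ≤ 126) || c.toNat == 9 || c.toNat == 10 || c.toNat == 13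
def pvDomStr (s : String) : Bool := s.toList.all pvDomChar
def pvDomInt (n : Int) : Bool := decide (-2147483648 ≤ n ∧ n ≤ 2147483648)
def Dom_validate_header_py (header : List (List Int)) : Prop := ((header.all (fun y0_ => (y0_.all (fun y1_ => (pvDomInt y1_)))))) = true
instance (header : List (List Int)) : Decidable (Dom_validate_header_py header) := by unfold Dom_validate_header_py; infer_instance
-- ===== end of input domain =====

-- B replaces A's -1-sentinel early-exit scan by a declarative check on the set of distinct row lengths (objective: simpler).

-- ===== PORT A =====
-- the 'for row in header' loop carrying the running sentinel 'length'
def vhLoop : List (List Int) → Int → Bool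
  | [], _ => true
  | row :: rest, length =>
    if row.isEmpty then false
    else if length == -1 then vhLoop rest (row.length : Int)
    else if (row.length : Int) != length then false
    else vhLoop rest length

def validate_header_py (header : List (List Int)) : Bool :=
  if header.isEmpty then false else vhLoop header (-1)

-- ===== PORT B =====
def validate_header_py_alt (header : List (List Int)) : Bool :=
  if header.isEmpty then false
  else
    let lengths := PySem.Set.ofList (header.map (fun row => (row.length : Int)))
    PySem.Set.len lengths == 1 && !(PySem.Set.contains lengths 0)

-- ===== PRECONDITION & SPEC =====
def Spec_validate_header_py (header : List (List Int)) (out : Bool) : Prop := out = validate_header_py_alt header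
instance (header : List (List Int)) (out : Bool) : Decidable (Spec_validate_header_py header out) := by unfold Spec_validate_header_py; infer_instance

-- ===== CLAIM (what is proved, stated in full; the proofs are below) =====
def Claim_equal_validate_header_py : Prop := ∀ (header : List (List Int)), Dom_validate_header_py header → Spec_validate_header_py header (validate_header_py header)

-- ===== LEMMAS AND PROOFS =====

-- A's loop after the sentinel is set: every remaining row nonempty and of length m
theorem vhLoop_natCast (rows : List (List Int)) (m : Nat) :
    vhLoop rows (m : Int) = rows.all (fun r => !r.isEmpty && (r.length : Int) == (m : Int)) := by
  induction rows with
  | nil => rfl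
  | cons r rest ih =>
    simp only [vhLoop, List.all_cons]
    by_cases hr : r.isEmpty
    · simp [hr]
    · have h1 : ((m : Int) == -1) = false := by simp
      by_cases h2 : (r.length : Int) = (m : Int)
      · simp only [hr, h1, h2]
        simp [ih]
      · simp [hr, h1, h2]

theorem set_ofList_all_eq (x : Int) (xs : List Int) :
    (∀ y ∈ xs, y = x) → PySem.Set.ofList (x :: xs) = [x] := by
  induction xs with
  | nil => intro _; rfl
  | cons z zs ih =>
    intro h
    have hz : z = x := h z (by simp)
    have e : PySem.Set.ofList (x :: z :: zs) = PySem.Set.ofList (x :: zs) := by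
      subst hz
      simp [PySem.Set.ofList, PySem.Set.add, List.foldl]
    rw [e]
    exact ih (fun y hy => h y (by simp [hy]))

theorem set_len_one_all_eq (x : Int) (xs : List Int)
    (h : (PySem.Set.ofList (x :: xs)).length = 1) : ∀ y ∈ xs, y = x := by
  obtain ⟨a, ha⟩ : ∃ a, PySem.Set.ofList (x :: xs) = [a] := by
    cases hs : PySem.Set.ofList (x :: xs) with
    | nil => rw [hs] at h; simp at h
    | cons a t =>
      rw [hs] at h
      simp at h
      exact ⟨a, by rw [h]⟩
  have hx : x = a := by
    have hm : x ∈ PySem.Set.ofList (x :: xs) := ((PySem.Set.mem_ofList _ _).mpr (by simp))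
    rw [ha] at hm; simpa using hm
  intro y hy
  have hm : y ∈ PySem.Set.ofList (x :: xs) := ((PySem.Set.mem_ofList _ _).mpr (by simp [hy]))
  rw [ha] at hm
  simp at hm
  rw [hm, ← hx]

-- ===== VERDICT (by name: the statement is the Claim_ definition above) =====
theorem validate_header_py_spec : Claim_equal_validate_header_py := by
  intro header _
  unfold Spec_validate_header_py validate_header_py validate_header_py_alt
  cases header with
  | nil => rfl
  | cons r rest =>
    simp only [List.isEmpty_cons, Bool.false_eq_true, if_false, List.map_cons]
    by_cases hr : r = []
    · subst hr
      simp [vhLoop]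
    · have hrne : r.isEmpty = false := by simpa using hr
      have hrl : r.length ≠ 0 := by simpa using hr
      have hA : vhLoop (r :: rest) (-1) = vhLoop rest (r.length : Int) := by
        simp [vhLoop, hrne]
      rw [hA, vhLoop_natCast]
      by_cases hall : ∀ s ∈ rest, s.length = r.length
      · have hset : PySem.Set.ofList ((r.length : Int) :: rest.map (fun row => (row.length : Int))) = [(r.length : Int)] := by
          apply set_ofList_all_eq
          intro y hy
          simp at hy
          obtain ⟨s, hs, rfl⟩ := hy
          exact congrArg Nat.cast (hall s hs)
        rw [hset]
        have hall' : rest.all (fun t => !t.isEmpty && ((t.length : Int) == (r.length : Int))) = true := by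
          simp only [List.all_eq_true, Bool.and_eq_true]
          intro s hs
          have h1 : s.length = r.length := hall s hs
          have h2 : s.isEmpty = false := by
            simp
            intro hn; rw [hn] at h1; exact hrl h1.symm
          simp [h1, h2]
        simp [hall', PySem.Set.len, PySem.Set.contains]
        omega
      · obtain ⟨s, hs, hne⟩ : ∃ s ∈ rest, s.length ≠ r.length := by simpa using hall
        have hlhs : (rest.all (fun t => !t.isEmpty && ((t.length : Int) == (r.length : Int)))) = false := by
          apply Bool.eq_false_iff.mpr
          intro hAll
          have h2 := (Bool.and_eq_true _ _ |>.mp (List.all_eq_true.mp hAll s hs)).2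
          exact hne (by exact_mod_cast (beq_iff_eq.mp h2))
        rw [hlhs]
        by_cases hlen : (PySem.Set.ofList ((r.length : Int) :: rest.map (fun row => (row.length : Int)))).length = 1
        · exfalso
          have hq := set_len_one_all_eq _ _ hlen ((s.length : Int)) (by simp; exact ⟨s, hs, rfl⟩)
          exact hne (by exact_mod_cast hq)
        · have hne1 : ((PySem.Set.ofList ((r.length : Int) :: rest.map (fun row => (row.length : Int)))).len == (1:Int)) = false := by
            simp [PySem.Set.len]
            omega
          simp only [hne1, Bool.false_and]
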